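-- pv_equiv track=rewrite | github.com/miliar/Code_Jam_Webscraper | solutions_python/Problem_179/3449.py | from_base_to_decimal
-- ===== SOURCE A (Python) =====
-- def from_base_to_decimal(num, base):
--     res = 0
--     mult = 1
--     while num:
--         res += mult * (num%10)
--         num//=10
--         mult *= base
--     return res
-- ===== SOURCE B (Python) =====
-- def from_base_to_decimal(num, base):
--     res = 0
--     for c in str(num):
--         res = res * base + int(c)
--     return res
-- ===== Notes on version B (the rewrite author's own statement) =====
-- stated objective: idiomatic
-- what changed: B replaces A's least-significant-first loop with a power-of-base multiplier by Horner's method over the decimal string of num, most-significant-first with a single accumulator.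
import Mathlib
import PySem

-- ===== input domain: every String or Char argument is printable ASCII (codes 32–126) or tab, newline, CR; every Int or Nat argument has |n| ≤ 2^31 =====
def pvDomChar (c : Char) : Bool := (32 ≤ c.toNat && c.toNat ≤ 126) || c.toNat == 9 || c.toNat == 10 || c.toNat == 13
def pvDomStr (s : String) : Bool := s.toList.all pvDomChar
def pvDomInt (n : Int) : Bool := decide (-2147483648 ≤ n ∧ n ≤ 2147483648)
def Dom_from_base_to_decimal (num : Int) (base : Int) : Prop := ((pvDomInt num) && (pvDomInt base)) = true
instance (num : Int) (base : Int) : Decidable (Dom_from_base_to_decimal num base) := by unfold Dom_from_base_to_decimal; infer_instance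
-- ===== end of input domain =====

-- B replaces A's least-significant-first loop with a power-of-base multiplier by Horner's
-- method over str(num), most-significant-first with a single accumulator (idiomatic rewrite).

-- ===== PORT A =====
-- A's `while num:` loop; on num < 0 the Python loop never terminates (excluded by Pre_),
-- so the port's guard is `0 < num` — identical to Python's `num != 0` on every input where A returns.
def fbdLoop (base res mult num : Int) : Int :=
  if h : 0 < num then
    fbdLoop base (res + mult * PySem.Int.mod num 10) (mult * base) (PySem.Int.floordiv num 10)
  else res
termination_by num.toNat
decreasing_by
  have : PySem.Int.floordiv num 10 = num / 10 := Int.fdiv_eq_ediv_of_nonneg _ (by norm_num)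
  rw [this]
  omega

def from_base_to_decimal (num : Int) (base : Int) : Int := fbdLoop base 0 1 num

-- ===== PORT B =====
-- `int(c)` ported as `(ofChars? [c]).getD 0`; under Pre_ (0 ≤ num) every character of
-- str(num) is a digit, so ofChars? is always `some` there and the default is never used.
def from_base_to_decimal_alt (num : Int) (base : Int) : Int :=
  (PySem.Int.toStr num).toList.foldl
    (fun res c => res * base + (PySem.Int.ofChars? [c]).getD 0) 0

-- ===== PRECONDITION & SPEC =====
-- Pre_ excludes negative num, on which Python A loops forever (num //= 10 stalls at -1).
def Pre_from_base_to_decimal (num : Int) (base : Int) : Prop := 0 ≤ num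
instance (num : Int) (base : Int) : Decidable (Pre_from_base_to_decimal num base) := by
  unfold Pre_from_base_to_decimal; infer_instance

def pvWitness_from_base_to_decimal : Int × Int := (375, 8)

def Spec_from_base_to_decimal (num : Int) (base : Int) (out : Int) : Prop := out = from_base_to_decimal_alt num base
instance (num : Int) (base : Int) (out : Int) : Decidable (Spec_from_base_to_decimal num base out) := by unfold Spec_from_base_to_decimal; infer_instance

-- ===== CLAIM (what is proved, stated in full; the proofs are below) =====
def Claim_equal_from_base_to_decimal : Prop := ∀ (num : Int) (base : Int), Dom_from_base_to_decimal num base → Pre_from_base_to_decimal num base → Spec_from_base_to_decimal num base (from_base_to_decimal num base)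

-- ===== LEMMAS AND PROOFS =====

-- Horner evaluation of the decimal digits of n in the given base, starting from acc.
def pvH (base acc : Int) (n : Nat) : Int :=
  if h : n < 10 then acc * base + (n : Int)
  else pvH base acc (n / 10) * base + ((n % 10 : Nat) : Int)
termination_by n
decreasing_by omega

theorem pvH_zero_lt (base : Int) (n : Nat) (h : n < 10) : pvH base 0 n = (n : Int) := by
  rw [pvH]; simp [h]

-- A's loop computes res + mult * (Horner value of n) on nonnegative inputs.
theorem fbdLoop_eq (base : Int) (n : Nat) : ∀ (res mult : Int),
    fbdLoop base res mult (n : Int) = res + mult * pvH base 0 n := by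
  induction n using Nat.strong_induction_on with
  | _ n ih =>
    intro res mult
    rw [fbdLoop]
    by_cases h0 : n = 0
    · subst h0
      simp [pvH_zero_lt base 0 (by norm_num)]
    · have hpos : (0 : Int) < (n : Int) := by exact_mod_cast Nat.pos_of_ne_zero h0
      rw [dif_pos hpos]
      have hmod : PySem.Int.mod (n : Int) 10 = ((n % 10 : Nat) : Int) := by
        show Int.fmod _ _ = _
        rw [Int.fmod_eq_emod_of_nonneg _ (by norm_num)]
        push_cast; rfl
      have hdiv : PySem.Int.floordiv (n : Int) 10 = ((n / 10 : Nat) : Int) := by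
        show Int.fdiv _ _ = _
        rw [Int.fdiv_eq_ediv_of_nonneg _ (by norm_num)]
        push_cast; rfl
      rw [hmod, hdiv, ih (n / 10) (by omega)]
      by_cases hn : n < 10
      · have h10 : n / 10 = 0 := Nat.div_eq_of_lt hn
        have hm : n % 10 = n := Nat.mod_eq_of_lt hn
        rw [h10, hm, pvH_zero_lt base n hn, pvH_zero_lt base 0 (by norm_num)]
        push_cast; ring
      · rw [show pvH base 0 n = pvH base 0 (n / 10) * base + ((n % 10 : Nat) : Int) by
          rw [pvH]; simp [hn]]
        ring

-- the fold step of port B, named for the lemmas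
def pvStep (base : Int) : Int → Char → Int :=
  fun res c => res * base + (PySem.Int.ofChars? [c]).getD 0

theorem pvStep_digitChar (base acc : Int) (d : Nat) (hd : d < 10) :
    pvStep base acc (Nat.digitChar d) = acc * base + (d : Int) := by
  interval_cases d <;> simp [pvStep, PySem.Int.ofChars?] <;> rfl

-- Horner fold over the characters produced by Nat.toDigitsCore.
theorem foldl_toDigitsCore (base : Int) (f : Nat) : ∀ (n : Nat) (l : List Char) (acc : Int),
    n < f →
    (Nat.toDigitsCore 10 f n l).foldl (pvStep base) acc = l.foldl (pvStep base) (pvH base acc n) := by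
  induction f with
  | zero => intro n l acc h; omega
  | succ f ih =>
    intro n l acc h
    rw [Nat.toDigitsCore]
    by_cases h10 : n / 10 = 0
    · have hn : n < 10 := by omega
      simp only [h10, if_pos trivial, reduceIte]
      rw [List.foldl_cons, pvStep_digitChar base acc (n % 10) (by omega),
        Nat.mod_eq_of_lt hn]
      rw [pvH]; simp [hn]
    · rw [if_neg h10]
      have hlt : n / 10 < f := by
        have : n / 10 < n := Nat.div_lt_self (by omega) (by norm_num)
        omega
      rw [ih (n / 10) _ acc hlt, List.foldl_cons,
        pvStep_digitChar base (pvH base acc (n / 10)) (n % 10) (by omega)]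
      rw [show pvH base acc n = pvH base acc (n / 10) * base + ((n % 10 : Nat) : Int) by
        rw [pvH]; simp [show ¬ n < 10 by omega]]

theorem alt_eq (num base : Int) (h : 0 ≤ num) :
    from_base_to_decimal_alt num base = pvH base 0 num.toNat := by
  unfold from_base_to_decimal_alt
  rw [show (PySem.Int.toStr num).toList = PySem.Int.toChars num from PySem.Int.toList_toStr num]
  rw [show PySem.Int.toChars num = Nat.toDigits 10 num.toNat by
    unfold PySem.Int.toChars; rw [if_neg (by omega)]]
  show (Nat.toDigitsCore 10 (num.toNat + 1) num.toNat []).foldl (pvStep base) 0 = _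
  rw [foldl_toDigitsCore base (num.toNat + 1) num.toNat [] 0 (by omega)]
  rfl

-- ===== VERDICT (by name: the statement is the Claim_ definition above) =====
theorem from_base_to_decimal_spec : Claim_equal_from_base_to_decimal := by
  intro num base _ hpre
  unfold Spec_from_base_to_decimal from_base_to_decimal
  rw [alt_eq num base hpre]
  rw [show fbdLoop base 0 1 num = fbdLoop base 0 1 ((num.toNat : Nat) : Int) by
    rw [Int.toNat_of_nonneg hpre]]
  rw [fbdLoop_eq base num.toNat 0 1]
  simp
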